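-- pv_equiv track=rewrite | github.com/nkchangliu/puzzles | leetcode/valid_subarray.py | valid_sub
-- ===== SOURCE A (Python) =====
-- def valid_sub(lst, low, high):
--     curr_index = 0
--     res = 0
--     num_sub = 0
--
--     for i in range(len(lst)):
--         if lst[i] >= low and lst[i] <= high:
--             res += i - curr_index + 1
--             num_sub = i - curr_index + 1
--         elif lst[i] < low:
--             res += num_sub
--         else:
--             curr_index = i + 1
--             num_sub = 0
--     return res
-- ===== SOURCE B (Python) =====
-- def valid_sub(lst, low, high):
--     # Count subarrays whose max lies in [low, high] as (#subarrays with all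
--     # elements <= high) - (#subarrays with all elements < low), counting each
--     # side run-by-run with the closed form L*(L+1)//2 per maximal run.
--     if low > high:
--         return 0
--     def count_runs(pred):
--         total = 0
--         run = 0
--         for x in lst:
--             if pred(x):
--                 run += 1
--             else:
--                 total += run * (run + 1) // 2
--                 run = 0
--         return total + run * (run + 1) // 2
--     return count_runs(lambda x: x <= high) - count_runs(lambda x: x < low)
-- ===== Notes on version B (the rewrite author's own statement) =====
-- stated objective: alternative
-- what changed: B replaces A's single incremental scan (curr_index/num_sub accumulator) with two run-length scans: count subarrays with all elements <= high minus those with all elements < low, adding the closed form L*(L+1)//2 per maximal run.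
import Mathlib
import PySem

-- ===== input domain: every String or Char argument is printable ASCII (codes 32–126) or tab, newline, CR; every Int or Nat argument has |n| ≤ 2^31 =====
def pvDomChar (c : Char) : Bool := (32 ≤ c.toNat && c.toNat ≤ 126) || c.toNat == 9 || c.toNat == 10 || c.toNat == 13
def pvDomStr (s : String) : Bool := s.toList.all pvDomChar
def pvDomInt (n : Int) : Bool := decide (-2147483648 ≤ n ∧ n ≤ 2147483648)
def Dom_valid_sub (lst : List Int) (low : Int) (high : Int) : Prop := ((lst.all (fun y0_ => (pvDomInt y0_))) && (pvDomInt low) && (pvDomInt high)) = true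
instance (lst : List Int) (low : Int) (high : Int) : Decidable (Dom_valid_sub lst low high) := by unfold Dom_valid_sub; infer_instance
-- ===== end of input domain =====

-- B counts subarrays with max in [low,high] as count(all ≤ high) − count(all < low),
-- summing L*(L+1)//2 per maximal run, instead of A's incremental num_sub accumulator.

-- ===== PORT A =====
-- state (i, curr_index, res, num_sub); the for-loop over range(len(lst)) with lst[i]
-- becomes a fold over the list carrying the index i.
def validSubStep (low high : Int) (st : Int × Int × Int × Int) (x : Int) : Int × Int × Int × Int :=
  match st with
  | (i, curr, res, ns) =>
    if low ≤ x ∧ x ≤ high then (i + 1, curr, res + (i - curr + 1), i - curr + 1)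
    else if x < low then (i + 1, curr, res + ns, ns)
    else (i + 1, i + 1, res, 0)

def valid_sub (lst : List Int) (low : Int) (high : Int) : Int :=
  (lst.foldl (validSubStep low high) (0, 0, 0, 0)).2.2.1

-- ===== PORT B =====
-- run*(run+1)//2, Python floor division
def tri (L : Int) : Int := PySem.Int.floordiv (L * (L + 1)) 2

def runStep (p : Int → Bool) (st : Int × Int) (x : Int) : Int × Int :=
  if p x then (st.1, st.2 + 1) else (st.1 + tri st.2, 0)

def countRuns (p : Int → Bool) (lst : List Int) : Int :=
  let s := lst.foldl (runStep p) (0, 0)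
  s.1 + tri s.2

def valid_sub_alt (lst : List Int) (low : Int) (high : Int) : Int :=
  if low > high then 0
  else countRuns (fun x => x ≤ high) lst - countRuns (fun x => x < low) lst

-- ===== PRECONDITION & SPEC =====
def Spec_valid_sub (lst : List Int) (low : Int) (high : Int) (out : Int) : Prop := out = valid_sub_alt lst low high
instance (lst : List Int) (low : Int) (high : Int) (out : Int) : Decidable (Spec_valid_sub lst low high out) := by unfold Spec_valid_sub; infer_instance

-- ===== CLAIM (what is proved, stated in full; the proofs are below) =====
def Claim_equal_valid_sub : Prop := ∀ (lst : List Int) (low : Int) (high : Int), Dom_valid_sub lst low high → Spec_valid_sub lst low high (valid_sub lst low high)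

-- ===== LEMMAS AND PROOFS =====

lemma tri_zero : tri 0 = 0 := by decide

lemma tri_succ (L : Int) : tri (L + 1) = tri L + (L + 1) := by
  obtain ⟨k, hk⟩ := Int.even_mul_succ_self L
  have h1 : L * (L + 1) = 2 * k := by omega
  have h2 : (L + 1) * (L + 1 + 1) = 2 * (k + (L + 1)) := by ring_nf; nlinarith [h1]
  unfold tri
  rw [h1, h2, PySem.Int.floordiv_eq_ediv_of_pos (by norm_num), PySem.Int.floordiv_eq_ediv_of_pos (by norm_num)]
  omega

lemma loop_inv (low high : Int) (h : low ≤ high) (lst : List Int) :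
    ∀ (i c res ns thi Lhi tlo Llo : Int),
    c = i - Lhi → ns = Lhi - Llo →
    res = thi + tri Lhi - (tlo + tri Llo) →
    (lst.foldl (validSubStep low high) (i, c, res, ns)).2.2.1
      = ((lst.foldl (runStep (fun x => x ≤ high)) (thi, Lhi)).1
          + tri (lst.foldl (runStep (fun x => x ≤ high)) (thi, Lhi)).2)
        - ((lst.foldl (runStep (fun x => x < low)) (tlo, Llo)).1
          + tri (lst.foldl (runStep (fun x => x < low)) (tlo, Llo)).2) := by
  induction lst with
  | nil =>
    intro i c res ns thi Lhi tlo Llo hc hns hres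
    simp [List.foldl]
    omega
  | cons x xs ih =>
    intro i c res ns thi Lhi tlo Llo hc hns hres
    simp only [List.foldl]
    by_cases h1 : low ≤ x ∧ x ≤ high
    · have hlx : (low ≤ x) = True := by simp [h1.1]
      have hhi : (x ≤ high) = True := by simp [h1.2]
      have hlo : (x < low) = False := by simp; omega
      simp only [validSubStep, runStep, hlx, hhi, hlo, true_and, if_true,
        decide_true, decide_false, Bool.false_eq_true, if_false]
      rw [ih (i+1) c (res + (i - c + 1)) (i - c + 1) thi (Lhi + 1) (tlo + tri Llo) 0
        (by omega) (by omega) (by rw [tri_succ]; rw [tri_zero]; omega)]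
    · by_cases h2 : x < low
      · have hlx : (low ≤ x) = False := by simp; omega
        have hhi : (x ≤ high) = True := by simp; omega
        have hlo : (x < low) = True := by simp [h2]
        simp only [validSubStep, runStep, hlx, hhi, hlo, false_and, if_false,
          decide_true, if_true]
        rw [ih (i+1) c (res + ns) ns thi (Lhi + 1) tlo (Llo + 1)
          (by omega) (by omega) (by rw [tri_succ, tri_succ]; omega)]
      · have hhi : (x ≤ high) = False := by simp; omega
        have hlo : (x < low) = False := by simp; omega
        simp only [validSubStep, runStep, hhi, hlo, and_false, if_false,
          decide_false, Bool.false_eq_true]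
        rw [ih (i+1) (i+1) res 0 (thi + tri Lhi) 0 (tlo + tri Llo) 0
          (by omega) (by omega) (by rw [tri_zero]; omega)]

lemma loop_empty_range (low high : Int) (h : high < low) (lst : List Int) :
    ∀ (i c res : Int),
    (lst.foldl (validSubStep low high) (i, c, res, 0)).2.2.1 = res := by
  induction lst with
  | nil => intro i c res; simp [List.foldl]
  | cons x xs ih =>
    intro i c res
    simp only [List.foldl]
    by_cases h1 : low ≤ x ∧ x ≤ high
    · omega
    · by_cases h2 : x < low
      · simp only [validSubStep, h1, h2, if_neg, if_pos, not_false_eq_true]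
        rw [show res + 0 = res by omega]
        exact ih (i+1) c res
      · simp only [validSubStep, h1, h2, if_neg, not_false_eq_true]
        exact ih (i+1) (i+1) res

-- ===== VERDICT (by name: the statement is the Claim_ definition above) =====
theorem valid_sub_spec : Claim_equal_valid_sub := by
  intro lst low high _
  unfold Spec_valid_sub valid_sub valid_sub_alt countRuns
  by_cases h : low > high
  · simp only [h, if_pos]
    exact loop_empty_range low high h lst 0 0 0
  · simp only [h, if_neg, not_false_eq_true]
    have := loop_inv low high (by omega) lst 0 0 0 0 0 0 0 0
      (by omega) (by omega) (by rw [tri_zero]; omega)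
    simpa using this
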